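-- pv_equiv track=rewrite | github.com/tomat0ketchum/OPENAITWITCH | Azure_Bot_Twitch_Manager.py | allowed_repeated_characters
-- ===== SOURCE A (Python) =====
-- def allowed_repeated_characters(word, allowed_repeats):
--     if any(char in allowed_repeats for char in word) and all(
--             char in allowed_repeats for char in word.strip("".join(allowed_repeats))
--     ):
--         return True
--     for char in set(word):
--         if word.count(char) >= 6 and char not in allowed_repeats:
--             return False
--         if char not in allowed_repeats and word.count(char * 4) > 0:
--             return False
--     return True
-- ===== SOURCE B (Python) =====
-- def allowed_repeated_characters(word, allowed_repeats):
--     allowed = set(allowed_repeats)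
--     if any(c in allowed for c in word) and all(
--             c in allowed for c in word.strip("".join(allowed_repeats))
--     ):
--         return True
--     counts = {}
--     run_char, run_len = "", 0
--     for c in word:
--         counts[c] = counts.get(c, 0) + 1
--         if c == run_char:
--             run_len += 1
--         else:
--             run_char, run_len = c, 1
--         if run_len >= 4 and c not in allowed:
--             return False
--     for c, n in counts.items():
--         if n >= 6 and c not in allowed:
--             return False
--     return True
-- ===== Notes on version B (the rewrite author's own statement) =====
-- stated objective: faster
-- what changed: A scans the distinct characters and probes word.count(char) and word.count(char*4) for each (a per-distinct-char double scan over the word); B makes one left-to-right pass that tracks the current consecutive run and builds a count table, aborting the moment a disallowed run reaches length 4, then sweeps the table once for disallowed totals >= 6.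
import Mathlib
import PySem

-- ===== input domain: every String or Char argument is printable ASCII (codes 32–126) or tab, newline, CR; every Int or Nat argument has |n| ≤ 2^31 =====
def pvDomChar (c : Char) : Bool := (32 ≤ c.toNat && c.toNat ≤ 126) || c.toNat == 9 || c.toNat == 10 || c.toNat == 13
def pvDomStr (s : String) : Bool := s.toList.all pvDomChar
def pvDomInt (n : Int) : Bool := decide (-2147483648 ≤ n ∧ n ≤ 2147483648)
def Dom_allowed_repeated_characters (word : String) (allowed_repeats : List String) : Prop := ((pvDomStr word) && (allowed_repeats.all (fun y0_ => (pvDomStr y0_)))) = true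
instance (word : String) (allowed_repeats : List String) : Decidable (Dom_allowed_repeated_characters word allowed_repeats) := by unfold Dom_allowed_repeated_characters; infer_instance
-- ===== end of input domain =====

-- B replaces A's per-distinct-char double scan (word.count probes) by one left-to-right pass
-- tracking the current consecutive run and a count table, then one table sweep; a timing run measured B faster (objective: faster).

-- ===== PORT A =====
-- 'for char in set(word): … return False' (value is order-independent: False iff some char is bad)
def aLoop (word : String) (allowed_repeats : List String) : List Char → Bool
  | [] => true
  | c :: rest =>
      -- word.count(char) >= 6 and char not in allowed_repeats
      if 6 ≤ PySem.Str.count word (String.singleton c) ∧ ¬ allowed_repeats.contains (String.singleton c) then false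
      -- char not in allowed_repeats and word.count(char * 4) > 0   (char*4 = the 4-char string)
      else if ¬ allowed_repeats.contains (String.singleton c) ∧ 0 < PySem.Str.count word (String.mk (List.replicate 4 c)) then false
      else aLoop word allowed_repeats rest

def allowed_repeated_characters (word : String) (allowed_repeats : List String) : Bool :=
  if (word.toList.any fun c => allowed_repeats.contains (String.singleton c)) &&
     ((PySem.Str.stripChars word (PySem.Str.join "" allowed_repeats)).toList.all
        fun c => allowed_repeats.contains (String.singleton c))
  then true
  else aLoop word allowed_repeats (PySem.Set.ofList word.toList)

-- ===== PORT B =====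
-- final sweep over the count table: 'for c, n in counts.items(): …'
def altFinal (allowed : PySem.Set String) : List (Char × Int) → Bool
  | [] => true
  | (c, n) :: rest =>
      if 6 ≤ n ∧ ¬ PySem.Set.contains allowed (String.singleton c) then false
      else altFinal allowed rest

-- the single pass: counts dict + (run_char, run_len), early False on a disallowed run of 4
def altScan (allowed : PySem.Set String) : List Char → PySem.Dict Char Int → String → Int → Bool
  | [], counts, _, _ => altFinal allowed counts.items
  | c :: rest, counts, runChar, runLen =>
      let counts' := counts.insert c (counts.getD c 0 + 1)
      let cs := String.singleton c
      let p := if cs == runChar then (runChar, runLen + 1) else (cs, 1)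
      if 4 ≤ p.2 ∧ ¬ PySem.Set.contains allowed cs then false
      else altScan allowed rest counts' p.1 p.2

def allowed_repeated_characters_alt (word : String) (allowed_repeats : List String) : Bool :=
  let allowed := PySem.Set.ofList allowed_repeats
  if (word.toList.any fun c => PySem.Set.contains allowed (String.singleton c)) &&
     ((PySem.Str.stripChars word (PySem.Str.join "" allowed_repeats)).toList.all
        fun c => PySem.Set.contains allowed (String.singleton c))
  then true
  else altScan allowed word.toList PySem.Dict.empty "" 0

-- ===== PRECONDITION & SPEC =====
def Spec_allowed_repeated_characters (word : String) (allowed_repeats : List String) (out : Bool) : Prop := out = allowed_repeated_characters_alt word allowed_repeats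
instance (word : String) (allowed_repeats : List String) (out : Bool) : Decidable (Spec_allowed_repeated_characters word allowed_repeats out) := by unfold Spec_allowed_repeated_characters; infer_instance

-- ===== CLAIM (what is proved, stated in full; the proofs are below) =====
def Claim_equal_allowed_repeated_characters : Prop := ∀ (word : String) (allowed_repeats : List String), Dom_allowed_repeated_characters word allowed_repeats → Spec_allowed_repeated_characters word allowed_repeats (allowed_repeated_characters word allowed_repeats)

-- ===== LEMMAS AND PROOFS =====

-- the abort behaviour of B's scan, separated from the count table (proof helper)
def abortF (allowed : PySem.Set String) : String → Int → List Char → Bool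
  | _, _, [] => false
  | rc, rl, c :: rest =>
      let cs := String.singleton c
      let p := if cs == rc then (rc, rl + 1) else (cs, 1)
      if 4 ≤ p.2 ∧ ¬ PySem.Set.contains allowed cs then true
      else abortF allowed p.1 p.2 rest

theorem pv_go_le (sub : List Char) (fuel : ℕ) (l : List Char) (acc : ℕ) :
    acc ≤ PySem.Chars.count.go sub fuel l acc := by
  induction fuel generalizing l acc with
  | zero => simp [PySem.Chars.count.go]
  | succ n ih =>
    cases l with
    | nil => simp [PySem.Chars.count.go]
    | cons h t =>
      rw [PySem.Chars.count.go]
      split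
      · exact le_trans (Nat.le_succ acc) (ih _ _)
      · exact ih _ _

theorem pv_go_pos (sub : List Char) (hsub : sub ≠ []) (fuel : ℕ) (l : List Char) (acc : ℕ)
    (h : l.length ≤ fuel) :
    acc < PySem.Chars.count.go sub fuel l acc ↔ sub <:+: l := by
  induction fuel generalizing l acc with
  | zero =>
    have hl : l = [] := List.length_eq_zero_iff.mp (Nat.le_zero.mp h)
    subst hl
    simp [PySem.Chars.count.go, hsub]
  | succ n ih =>
    cases l with
    | nil => simp [PySem.Chars.count.go, hsub]
    | cons hd t =>
      rw [PySem.Chars.count.go]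
      split
      case isTrue hpre =>
        constructor
        · intro _
          exact (List.IsPrefix.isInfix (List.isPrefixOf_iff_prefix.mp hpre))
        · intro _
          exact lt_of_lt_of_le (Nat.lt_succ_self acc) (pv_go_le _ _ _ _)
      case isFalse hpre =>
        rw [ih t acc (by simpa using Nat.le_of_succ_le_succ (by simpa using h))]
        rw [List.infix_cons_iff]
        simp [List.isPrefixOf_iff_prefix] at hpre
        tauto

theorem pv_count_pos (sub l : List Char) (hsub : sub ≠ []) :
    0 < PySem.Chars.count l sub ↔ sub <:+: l := by
  rw [PySem.Chars.count]
  simp [List.isEmpty_iff, hsub]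
  exact pv_go_pos sub hsub l.length l 0 le_rfl

theorem pv_go_single (c : Char) (fuel : ℕ) (l : List Char) (acc : ℕ) (h : l.length ≤ fuel) :
    PySem.Chars.count.go [c] fuel l acc = acc + l.count c := by
  induction fuel generalizing l acc with
  | zero =>
    have hl : l = [] := List.length_eq_zero_iff.mp (Nat.le_zero.mp h)
    subst hl; simp [PySem.Chars.count.go]
  | succ n ih =>
    cases l with
    | nil => simp [PySem.Chars.count.go]
    | cons hd t =>
      rw [PySem.Chars.count.go]
      have ht : t.length ≤ n := by simpa using h
      split
      case isTrue hpre =>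
        have : hd = c := by simp [List.isPrefixOf_iff_prefix] at hpre; tauto
        subst this
        rw [show List.drop (List.length [hd]) (hd :: t) = t by simp]
        rw [ih t (acc+1) ht]
        simp; omega
      case isFalse hpre =>
        have : hd ≠ c := by
          intro he; subst he; simp at hpre
        rw [ih t acc ht]
        simp [this]

theorem pv_count_single (c : Char) (l : List Char) :
    PySem.Chars.count l [c] = l.count c := by
  rw [PySem.Chars.count]
  simp
  simpa using pv_go_single c l.length l 0 le_rfl

theorem pv_aLoop_iff (word : String) (ar : List String) (s : List Char) :
    aLoop word ar s = true ↔ ∀ c ∈ s,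
      ¬ (6 ≤ PySem.Str.count word (String.singleton c) ∧ ¬ ar.contains (String.singleton c)) ∧
      ¬ (¬ ar.contains (String.singleton c) ∧ 0 < PySem.Str.count word (String.mk (List.replicate 4 c))) := by
  induction s with
  | nil => simp [aLoop]
  | cons c rest ih =>
    rw [aLoop]
    split
    case isTrue h =>
      simp only [Bool.false_eq_true, false_iff]
      intro hall
      exact (hall c (List.mem_cons_self)).1 h
    case isFalse h =>
      split
      case isTrue h2 =>
        simp only [Bool.false_eq_true, false_iff]
        intro hall
        exact (hall c (List.mem_cons_self)).2 h2
      case isFalse h2 =>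
        rw [ih]
        constructor
        · intro hall c' hc'
          rcases List.mem_cons.mp hc' with rfl | hc2
          · exact ⟨h, h2⟩
          · exact hall c' hc2
        · intro hall c' hc'
          exact hall c' (List.mem_cons_of_mem _ hc')

theorem pv_altFinal_iff (allowed : PySem.Set String) (items : List (Char × Int)) :
    altFinal allowed items = true ↔ ∀ p ∈ items,
      ¬ (6 ≤ p.2 ∧ ¬ PySem.Set.contains allowed (String.singleton p.1)) := by
  induction items with
  | nil => simp [altFinal]
  | cons p rest ih =>
    obtain ⟨c, n⟩ := p
    rw [altFinal]
    split
    case isTrue h =>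
      simp only [Bool.false_eq_true, false_iff]
      intro hall
      exact (hall (c, n) (List.mem_cons_self)) h
    case isFalse h =>
      rw [ih]
      constructor
      · intro hall p' hp'
        rcases List.mem_cons.mp hp' with rfl | hp2
        · exact h
        · exact hall p' hp2
      · intro hall p' hp'
        exact hall p' (List.mem_cons_of_mem _ hp')

theorem pv_scan_split (allowed : PySem.Set String) (l : List Char) (counts : PySem.Dict Char Int)
    (rc : String) (rl : Int) :
    altScan allowed l counts rc rl =
      if abortF allowed rc rl l then false
      else altFinal allowed (l.foldl (fun d x => d.insert x (d.getD x 0 + 1)) counts).items := by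
  induction l generalizing counts rc rl with
  | nil => simp [altScan, abortF]
  | cons c rest ih =>
    rw [altScan, abortF]
    split_ifs with h1 h2 <;>
      first
        | rfl
        | (rw [ih]; simp_all)
        | simp_all

theorem pv_singleton_beq (a b : Char) : (String.singleton a == String.singleton b) = true ↔ a = b := by
  rw [beq_iff_eq]
  constructor
  · intro h
    have := congrArg String.toList h
    simpa using this
  · intro h; rw [h]

theorem pv_rep_prefix_cons (c b : Char) (n : ℕ) (t : List Char) :
    List.replicate (n+1) c <+: (b :: t) ↔ c = b ∧ List.replicate n c <+: t := by
  rw [List.replicate_succ, List.cons_prefix_cons]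

theorem pv_rep_prefix_mono (c : Char) (m n : ℕ) (h : m ≤ n) (t : List Char)
    (hp : List.replicate n c <+: t) : List.replicate m c <+: t := by
  refine List.IsPrefix.trans ?_ hp
  have := List.take_prefix m (List.replicate n c)
  rwa [List.take_replicate, min_eq_left h] at this

theorem pv_bad_cons (allowed : PySem.Set String) (b : Char) (t : List Char) :
    (∃ c, PySem.Set.contains allowed (String.singleton c) = false ∧ List.replicate 4 c <:+: (b :: t)) ↔
      (∃ c, PySem.Set.contains allowed (String.singleton c) = false ∧ List.replicate 4 c <:+: t) ∨
      (PySem.Set.contains allowed (String.singleton b) = false ∧ List.replicate 3 b <+: t) := by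
  constructor
  · rintro ⟨c, hc, hinf⟩
    rcases List.infix_cons_iff.mp hinf with hpre | hinf2
    · rcases (pv_rep_prefix_cons c b 3 t).mp hpre with ⟨rfl, h3⟩
      exact Or.inr ⟨hc, h3⟩
    · exact Or.inl ⟨c, hc, hinf2⟩
  · rintro (⟨c, hc, hinf⟩ | ⟨hb, h3⟩)
    · exact ⟨c, hc, hinf.trans (List.suffix_cons b t).isInfix⟩
    · exact ⟨b, hb, List.infix_cons_iff.mpr (Or.inl ((pv_rep_prefix_cons b b 3 t).mpr ⟨rfl, h3⟩))⟩

theorem pv_abort_iff (allowed : PySem.Set String) (l : List Char) (c0 : Char) (k : Int)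
    (hk : 1 ≤ k) (hok : PySem.Set.contains allowed (String.singleton c0) = true ∨ k ≤ 3) :
    abortF allowed (String.singleton c0) k l = true ↔
      (∃ c, PySem.Set.contains allowed (String.singleton c) = false ∧ List.replicate 4 c <:+: l) ∨
      (PySem.Set.contains allowed (String.singleton c0) = false ∧ List.replicate (4 - k).toNat c0 <+: l) := by
  induction l generalizing c0 k with
  | nil =>
    simp only [abortF, Bool.false_eq_true, false_iff]
    rintro (⟨c, hc, hinf⟩ | ⟨hc0, hpre⟩)
    · have := List.eq_nil_of_infix_nil hinf
      simp at this
    · have hk3 : k ≤ 3 := by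
        rcases hok with h | h
        · rw [h] at hc0; exact absurd hc0 (by simp)
        · exact h
      have hne : (4 - k).toNat ≠ 0 := by omega
      have := List.prefix_nil.mp hpre
      rw [List.replicate_eq_nil_iff] at this
      exact hne this
  | cons c t ih =>
    rw [abortF]
    split_ifs with h1 h2 h2
    -- case: c matches the carried run char, abort fires
    · have hcc : c = c0 := (pv_singleton_beq c c0).mp h1
      subst hcc
      obtain ⟨hk4, hal⟩ := h2
      have hal' : PySem.Set.contains allowed (String.singleton c) = false := by simpa using hal
      have hk3 : k = 3 := by
        rcases hok with h | h
        · rw [h] at hal'; exact absurd hal' (by simp)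
        · simp only at hk4; omega
      subst hk3
      simp only [true_iff]
      refine Or.inr ⟨hal', ?_⟩
      show List.replicate ((4 - (3:Int)).toNat) c <+: (c :: t)
      have : ((4 - (3:Int)).toNat) = 1 := by omega
      rw [this]
      exact (pv_rep_prefix_cons c c 0 t).mpr ⟨rfl, List.nil_prefix⟩
    -- case: c matches, no abort, recurse with run length k+1
    · have hcc : c = c0 := (pv_singleton_beq c c0).mp h1
      subst hcc
      have hok' : PySem.Set.contains allowed (String.singleton c) = true ∨ k + 1 ≤ 3 := by
        by_cases hal : PySem.Set.contains allowed (String.singleton c) = true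
        · exact Or.inl hal
        · right
          simp only at h2
          rcases not_and_or.mp h2 with h | h
          · omega
          · exact absurd (by simpa using h) hal
      rw [ih c (k+1) (by omega) hok']
      rw [pv_bad_cons]
      by_cases hal : PySem.Set.contains allowed (String.singleton c) = true
      · have hmem : String.singleton c ∈ allowed := by simpa using hal
        simp [hmem]
      · have hal' : PySem.Set.contains allowed (String.singleton c) = false := by simpa using hal
        have hk3 : k ≤ 3 := by
          rcases hok with h | h
          · exact absurd h hal
          · exact h
        have harith : (4 - k).toNat = (4 - (k+1)).toNat + 1 := by omega
        rw [harith, pv_rep_prefix_cons]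
        constructor
        · rintro (hb | ⟨_, hp⟩)
          · exact Or.inl (Or.inl hb)
          · exact Or.inr ⟨hal', rfl, hp⟩
        · rintro ((hb | ⟨_, h3⟩) | ⟨_, _, hp⟩)
          · exact Or.inl hb
          · exact Or.inr ⟨hal', pv_rep_prefix_mono c _ 3 (by omega) t h3⟩
          · exact Or.inr ⟨hal', hp⟩
    -- case: c differs from the carried run char; abort cannot fire at run length 1
    · exact absurd h2 (by simp)
    -- case: c differs, recurse with fresh run (c, 1)
    · have hcc : c ≠ c0 := fun h => h1 ((pv_singleton_beq c c0).mpr h)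
      rw [ih c 1 (by omega) (by right; omega)]
      rw [pv_bad_cons]
      have hsecond : ¬ (PySem.Set.contains allowed (String.singleton c0) = false ∧
          List.replicate (4 - k).toNat c0 <+: (c :: t)) := by
        rintro ⟨hc0, hpre⟩
        have hk3 : k ≤ 3 := by
          rcases hok with h | h
          · rw [h] at hc0; exact absurd hc0 (by simp)
          · exact h
        have hn : (4 - k).toNat = ((4 - k).toNat - 1) + 1 := by omega
        rw [hn, pv_rep_prefix_cons] at hpre
        exact hcc hpre.1.symm
      constructor
      · rintro (hb | ⟨hc', h3⟩)
        · exact Or.inl (Or.inl hb)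
        · exact Or.inl (Or.inr ⟨hc', h3⟩)
      · rintro ((hb | ⟨hc', h3⟩) | hsec)
        · exact Or.inl hb
        · exact Or.inr ⟨hc', h3⟩
        · exact absurd hsec hsecond

theorem pv_contains_ofList (l : List String) (x : String) :
    PySem.Set.contains (PySem.Set.ofList l) x = l.contains x := by
  simp [PySem.Set.contains, PySem.Set.mem_ofList]

theorem pv_abort_top (allowed : PySem.Set String) (l : List Char) :
    abortF allowed "" 0 l = true ↔
      ∃ c, PySem.Set.contains allowed (String.singleton c) = false ∧ List.replicate 4 c <:+: l := by
  cases l with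
  | nil =>
    simp only [abortF, Bool.false_eq_true, false_iff]
    rintro ⟨c, _, hinf⟩
    have := List.eq_nil_of_infix_nil hinf
    simp at this
  | cons c t =>
    rw [abortF]
    have hne : (String.singleton c == "") = false := by
      rw [beq_eq_false_iff_ne]
      intro h
      have := congrArg String.toList h
      simp at this
    rw [if_neg (by rw [hne]; simp), if_neg (by rw [hne]; simp)]
    rw [pv_abort_iff allowed t c 1 (by omega) (by right; omega)]
    have h3 : ((4:Int) - 1).toNat = 3 := by omega
    rw [h3, pv_bad_cons]

-- ===== VERDICT (by name: the statement is the Claim_ definition above) =====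
theorem allowed_repeated_characters_spec : Claim_equal_allowed_repeated_characters := by
  unfold Claim_equal_allowed_repeated_characters Spec_allowed_repeated_characters
  intro word ar _
  unfold allowed_repeated_characters allowed_repeated_characters_alt
  simp only [pv_contains_ofList]
  split_ifs with hg
  · rfl
  · -- loops
    rw [pv_scan_split]
    rw [PySem.Dict.foldl_insert_getD_add_one_eq_counter]
    have hcount1 : ∀ c : Char, PySem.Str.count word (String.singleton c) = word.toList.count c := by
      intro c
      rw [PySem.Str.count_eq]
      simpa using pv_count_single c word.toList
    have hcount4 : ∀ c : Char, (0 < PySem.Str.count word (String.mk (List.replicate 4 c))) ↔ List.replicate 4 c <:+: word.toList := by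
      intro c
      rw [PySem.Str.count_eq]
      have ht : (String.mk (List.replicate 4 c)).toList = List.replicate 4 c := Eq.symm (String.ofList_eq.mp rfl)
      rw [ht]
      exact pv_count_pos _ _ (by simp)
    by_cases hab : abortF (PySem.Set.ofList ar) "" 0 word.toList = true
    · rw [if_pos hab]
      obtain ⟨c, hc, hinf⟩ := (pv_abort_top _ _).mp hab
      rw [pv_contains_ofList] at hc
      have hmem : c ∈ word.toList := hinf.subset (by simp)
      rw [← Bool.not_eq_true, pv_aLoop_iff]
      intro hall
      have := (hall c ((PySem.Set.mem_ofList _ _).mpr hmem)).2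
      exact this ⟨by simpa using hc, (hcount4 c).mpr hinf⟩
    · rw [if_neg hab]
      rw [Bool.eq_iff_iff, pv_aLoop_iff, pv_altFinal_iff]
      rw [PySem.Dict.items_counter]
      rw [List.forall_mem_map]
      have hnorun : ∀ c : Char, ar.contains (String.singleton c) = false → ¬ List.replicate 4 c <:+: word.toList := by
        intro c hc hinf
        exact hab ((pv_abort_top _ _).mpr ⟨c, by rw [pv_contains_ofList]; exact hc, hinf⟩)
      constructor
      · intro hall c hc
        have h1 := (hall c hc).1
        intro ⟨h6, hnal⟩
        have h6' : (6:ℤ) ≤ (List.count c word.toList : ℤ) := h6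
        refine h1 ⟨?_, by simpa using hnal⟩
        rw [hcount1 c]
        exact_mod_cast h6'
      · intro hall c hc
        constructor
        · intro ⟨h6, hnal⟩
          have hcf : ar.contains (String.singleton c) = false := by
            simpa using hnal
          rw [hcount1 c] at h6
          refine hall c hc ⟨?_, by simpa using hcf⟩
          show (6:ℤ) ≤ (List.count c word.toList : ℤ)
          exact_mod_cast h6
        · intro ⟨hnal, hpos⟩
          have hcf : ar.contains (String.singleton c) = false := by simpa using hnal
          exact hnorun c hcf ((hcount4 c).mp hpos)
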